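-- pv_equiv track=rewrite | github.com/LucasAFournier/predictris | scripts/plot_nodes_count.py | group_parameters
-- ===== SOURCE A (Python) =====
-- def extract_parameters(config_string):
--     """Extract parameters and their values from config string."""
--     params = {}
--     for param in config_string.split('_'):
--         if '=' in param:
--             key, value = param.split('=')
--             params[key] = value
--     return params
--
-- def group_parameters(configs):
--     """Group parameters into common and varying."""
--     all_params = [extract_parameters(config) for config in configs]
--
--     common = {}
--     varying = {}
--
--     # Get all parameter keys
--     all_keys = set().union(*(params.keys() for params in all_params))
--
--     # Check each parameter
--     for key in all_keys:
--         values = [params.get(key) for params in all_params]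
--         values = [v for v in values if v is not None]  # Remove None values
--
--         if len(set(values)) == 1:  # If all values are the same
--             common[key] = values[0]
--         else:
--             varying[key] = True
--
--     return common, varying
-- ===== SOURCE B (Python) =====
-- def extract_parameters(config_string):
--     """Extract parameters and their values from config string."""
--     params = {}
--     for param in config_string.split('_'):
--         if '=' in param:
--             key, value = param.split('=')
--             params[key] = value
--     return params
--
-- def group_parameters(configs):
--     """Group parameters into common and varying (single aggregation pass)."""
--     rep = {}          # key -> first value seen
--     conflict = set()  # keys seen with two different values
--     for config in configs:
--         for key, value in extract_parameters(config).items():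
--             if key not in rep:
--                 rep[key] = value
--             elif rep[key] != value:
--                 conflict.add(key)
--     common = {k: v for k, v in rep.items() if k not in conflict}
--     varying = {k: True for k in rep if k in conflict}
--     return common, varying
-- ===== Notes on version B (the rewrite author's own statement) =====
-- stated objective: alternative
-- what changed: Replaces A's collect-all-keys-then-rescan-every-config-per-key structure by one aggregation pass that keeps a first-value dict plus a conflict set, then emits common/varying from that table.
import Mathlib
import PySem

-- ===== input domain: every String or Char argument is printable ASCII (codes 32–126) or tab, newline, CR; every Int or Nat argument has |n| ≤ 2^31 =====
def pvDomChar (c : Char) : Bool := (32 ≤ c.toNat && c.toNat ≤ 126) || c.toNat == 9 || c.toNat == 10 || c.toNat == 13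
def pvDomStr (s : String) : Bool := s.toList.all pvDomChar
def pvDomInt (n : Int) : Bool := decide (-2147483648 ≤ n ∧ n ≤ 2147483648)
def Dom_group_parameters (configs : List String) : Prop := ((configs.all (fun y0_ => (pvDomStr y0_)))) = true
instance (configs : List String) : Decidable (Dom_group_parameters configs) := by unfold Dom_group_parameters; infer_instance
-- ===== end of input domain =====

-- B replaces A's collect-all-keys-then-rescan-all-configs-per-key structure by a single
-- aggregation pass keeping a first-value dict and a conflict set (objective: alternative).

-- ===== PORT A =====
-- shared helper (Source B keeps extract_parameters verbatim, so both ports use this transliteration)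
def extract_parameters (config_string : String) : PySem.Dict String String :=
  ((PySem.Str.split? config_string "_").getD []).foldl
    (fun params param =>
      match (PySem.Str.split? param "=").getD [] with
      | [key, value] => params.insert key value
      | _ => params)
    PySem.Dict.empty

def group_parameters_akey (all_params : List (PySem.Dict String String))
    (cv : PySem.Dict String String × PySem.Dict String Bool) (key : String) :
    PySem.Dict String String × PySem.Dict String Bool :=
  let values := (all_params.map (fun params => params.get? key)).filterMap (fun v => v)
  if (PySem.Set.ofList values).length = 1 then
    (cv.1.insert key (values.headD ""), cv.2)
  else
    (cv.1, cv.2.insert key true)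

def group_parameters (configs : List String) : (List (String × String)) × (List (String × Bool)) :=
  let all_params := configs.map extract_parameters
  let all_keys : PySem.Set String :=
    all_params.foldl (fun s params => PySem.Set.union s params.keys) PySem.Set.empty
  let cv := all_keys.foldl (group_parameters_akey all_params)
    (PySem.Dict.empty, PySem.Dict.empty)
  (cv.1.items, cv.2.items)

-- ===== PORT B =====
-- loop body of Source B's single pass (rc = (rep, conflict))
def group_parameters_bstep (rc : PySem.Dict String String × PySem.Set String)
    (kv : String × String) : PySem.Dict String String × PySem.Set String :=
  if rc.1.contains kv.1 = false then (rc.1.insert kv.1 kv.2, rc.2)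
  else if rc.1.getD kv.1 "" ≠ kv.2 then (rc.1, PySem.Set.add rc.2 kv.1)
  else rc
def group_parameters_alt (configs : List String) : (List (String × String)) × (List (String × Bool)) :=
  let rc := configs.foldl
    (fun rc config => (extract_parameters config).items.foldl group_parameters_bstep rc)
    (PySem.Dict.empty, PySem.Set.empty)
  let common := rc.1.items.foldl
    (fun d kv => if PySem.Set.contains rc.2 kv.1 then d else d.insert kv.1 kv.2)
    PySem.Dict.empty
  let varying := rc.1.keys.foldl
    (fun d k => if PySem.Set.contains rc.2 k then d.insert k true else d)
    PySem.Dict.empty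
  (common.items, varying.items)

-- ===== PRECONDITION & SPEC =====
-- Pre_ excludes exactly the inputs where some '_'-segment contains two or more '=',
-- on which Python A (and B alike) raises ValueError in "key, value = param.split('=')".
def Pre_group_parameters (configs : List String) : Prop :=
  ∀ c ∈ configs, ∀ p ∈ (PySem.Str.split? c "_").getD [], PySem.Str.count p "=" ≤ 1
instance (configs : List String) : Decidable (Pre_group_parameters configs) := by
  unfold Pre_group_parameters; infer_instance

def pvWitness_group_parameters : List String := ["a=1_b=2_mode=fast", "a=1_b=3_mode=fast"]

def Spec_group_parameters (configs : List String) (out : (List (String × String)) × (List (String × Bool))) : Prop := out = group_parameters_alt configs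
instance (configs : List String) (out : (List (String × String)) × (List (String × Bool))) : Decidable (Spec_group_parameters configs out) := by unfold Spec_group_parameters; infer_instance

-- ===== CLAIM (what is proved, stated in full; the proofs are below) =====
def Claim_equal_group_parameters : Prop := ∀ (configs : List String), Dom_group_parameters configs → Pre_group_parameters configs → Spec_group_parameters configs (group_parameters configs)

-- ===== LEMMAS AND PROOFS =====
theorem bstep_list (l : List (String × String)) (hl : (l.map Prod.fst).Nodup)
    (r : PySem.Dict String String) (c : PySem.Set String) :
    (∀ k, (l.foldl group_parameters_bstep (r, c)).1.get? k
        = (r.get? k).or ((PySem.Dict.mk l).get? k))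
  ∧ (l.foldl group_parameters_bstep (r, c)).1.keys
        = PySem.Set.update r.keys (l.map Prod.fst)
  ∧ ∀ k, (k ∈ (l.foldl group_parameters_bstep (r, c)).2 ↔
        k ∈ c ∨ ∃ w, r.get? k = some w ∧ ∃ v, (PySem.Dict.mk l).get? k = some v ∧ v ≠ w) := by
  induction l generalizing r c with
  | nil =>
    refine ⟨fun k => ?_, ?_, fun k => ?_⟩
    · simp [PySem.Dict.get?]
    · simp [PySem.Set.update]
    · simp [PySem.Dict.get?]
  | cons kv l ih =>
    simp only [List.map_cons, List.nodup_cons] at hl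
    obtain ⟨hnotin, hnd⟩ := hl
    simp only [List.foldl_cons, List.map_cons]
    have hlknone : (PySem.Dict.mk l).get? kv.1 = none := by
      rw [PySem.Dict.get?_eq_none_iff_not_mem_keys]
      simpa using hnotin
    by_cases hc : r.contains kv.1 = false
    · -- fresh key: insert
      have hrnone : r.get? kv.1 = none := by
        have h := PySem.Dict.contains_eq_isSome_get? r kv.1
        rw [hc] at h
        exact Option.not_isSome_iff_eq_none.mp (by simp [← h])
      have hknotkeys : kv.1 ∉ r.keys := fun hmem =>
        by simp [(PySem.Dict.contains_iff_mem_keys (d := r) (k := kv.1)).mpr hmem] at hc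
      have hstep : group_parameters_bstep (r, c) kv = (r.insert kv.1 kv.2, c) := by
        simp [group_parameters_bstep, hc]
      rw [hstep]
      obtain ⟨iha, ihb, ihc⟩ := ih hnd (r.insert kv.1 kv.2) c
      refine ⟨fun k => ?_, ?_, fun k => ?_⟩
      · rw [iha k, PySem.Dict.get?_insert, PySem.Dict.get?_mk_cons]
        by_cases hk : k = kv.1
        · subst hk; simp [hrnone]
        · have hbk : (kv.1 == k) = false := by simp [Ne.symm hk]
          simp [hk, hbk]
      · rw [ihb, PySem.Set.update_cons, PySem.Dict.keys_insert_of_not_contains _ _ hc]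
        congr 1
        simp [PySem.Set.add, hknotkeys]
      · rw [ihc k, PySem.Dict.get?_insert, PySem.Dict.get?_mk_cons]
        by_cases hk : k = kv.1
        · subst hk
          simp [hrnone, hlknone]
        · have hbk : (kv.1 == k) = false := by simp [Ne.symm hk]
          simp [hk, hbk]
    · -- key present
      rw [Bool.not_eq_false] at hc
      obtain ⟨w0, hw0⟩ : ∃ w, r.get? kv.1 = some w := by
        have h := PySem.Dict.contains_eq_isSome_get? r kv.1
        rw [hc] at h
        exact Option.isSome_iff_exists.mp h.symm
      have hgetD : r.getD kv.1 "" = w0 := by simp [PySem.Dict.getD, hw0]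
      have hkkeys : PySem.Set.contains r.keys kv.1 = true := by
        simp only [PySem.Set.contains_iff]
        exact (PySem.Dict.contains_iff_mem_keys r kv.1).mp hc
      have hadd : PySem.Set.add r.keys kv.1 = r.keys := by
        have hm : kv.1 ∈ r.keys := (PySem.Dict.contains_iff_mem_keys r kv.1).mp hc
        simp [PySem.Set.add, hm]
      by_cases hne : r.getD kv.1 "" ≠ kv.2
      · have hstep : group_parameters_bstep (r, c) kv = (r, PySem.Set.add c kv.1) := by
          simp [group_parameters_bstep, hc, hne]
        rw [hstep]
        obtain ⟨iha, ihb, ihc⟩ := ih hnd r (PySem.Set.add c kv.1)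
        refine ⟨fun k => ?_, ?_, fun k => ?_⟩
        · rw [iha k, PySem.Dict.get?_mk_cons]
          by_cases hk : k = kv.1
          · subst hk; simp [hw0]
          · have hbk : (kv.1 == k) = false := by simp [Ne.symm hk]
            simp [hbk]
        · rw [ihb, PySem.Set.update_cons, hadd]
        · rw [ihc k, PySem.Set.mem_add, PySem.Dict.get?_mk_cons]
          by_cases hk : k = kv.1
          · subst hk
            rw [hgetD] at hne
            simp only [hlknone, hw0, beq_self_eq_true, if_pos rfl]
            constructor
            · intro _
              exact Or.inr ⟨w0, rfl, kv.2, by simp, Ne.symm hne⟩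
            · intro _
              exact Or.inl (Or.inr trivial)
          · have hbk : (kv.1 == k) = false := by simp [Ne.symm hk]
            simp only [hbk, if_neg (by simp : ¬ (false = true))]
            constructor
            · rintro ((h | h) | h)
              · exact Or.inl h
              · exact absurd h hk
              · exact Or.inr h
            · rintro (h | h)
              · exact Or.inl (Or.inl h)
              · exact Or.inr h
      · rw [not_not] at hne
        have hstep : group_parameters_bstep (r, c) kv = (r, c) := by
          simp [group_parameters_bstep, hc, hne]
        rw [hstep]
        obtain ⟨iha, ihb, ihc⟩ := ih hnd r c
        refine ⟨fun k => ?_, ?_, fun k => ?_⟩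
        · rw [iha k, PySem.Dict.get?_mk_cons]
          by_cases hk : k = kv.1
          · subst hk; simp [hw0]
          · have hbk : (kv.1 == k) = false := by simp [Ne.symm hk]
            simp [hbk]
        · rw [ihb, PySem.Set.update_cons, hadd]
        · rw [ihc k, PySem.Dict.get?_mk_cons]
          by_cases hk : k = kv.1
          · subst hk
            rw [hgetD] at hne
            simp only [hlknone, hw0, beq_self_eq_true, if_pos rfl]
            constructor
            · rintro (h | ⟨w, hw, v, hv, hvw⟩)
              · exact Or.inl h
              · simp at hv
            · rintro (h | ⟨w, hw, v, hv, hvw⟩)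
              · exact Or.inl h
              · exfalso
                rw [if_pos trivial] at hv
                injection hw with hw'
                injection hv with hv'
                exact hvw (hv'.symm.trans (hne.symm.trans hw'))
          · have hbk : (kv.1 == k) = false := by simp [Ne.symm hk]
            simp [hbk]


def pvVals (D : List (PySem.Dict String String)) (k : String) : List String :=
  (D.map (fun d => d.get? k)).filterMap (fun v => v)

def pvConfl : Option String → List String → Prop
  | _, [] => False
  | none, v :: l => pvConfl (some v) l
  | some w, v :: l => v ≠ w ∨ pvConfl (some w) l

theorem pvVals_cons (d : PySem.Dict String String) (D : List (PySem.Dict String String)) (k : String) :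
    pvVals (d :: D) k = match d.get? k with
      | some v => v :: pvVals D k
      | none => pvVals D k := by
  cases h : d.get? k <;> simp [pvVals, List.filterMap_cons, h]

theorem bstep_dict (d : PySem.Dict String String) (hd : d.keys.Nodup)
    (r : PySem.Dict String String) (c : PySem.Set String) :
    (∀ k, (d.items.foldl group_parameters_bstep (r, c)).1.get? k
        = (r.get? k).or (d.get? k))
  ∧ (d.items.foldl group_parameters_bstep (r, c)).1.keys
        = PySem.Set.update r.keys d.keys
  ∧ ∀ k, (k ∈ (d.items.foldl group_parameters_bstep (r, c)).2 ↔
        k ∈ c ∨ ∃ w, r.get? k = some w ∧ ∃ v, d.get? k = some v ∧ v ≠ w) := by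
  have h := bstep_list d.items (by simpa [PySem.Dict.keys] using hd) r c
  simpa [PySem.Dict.keys] using h

theorem bfold_spec (D : List (PySem.Dict String String)) (hD : ∀ d ∈ D, d.keys.Nodup)
    (r : PySem.Dict String String) (c : PySem.Set String) :
    (∀ k, (D.foldl (fun rc d => d.items.foldl group_parameters_bstep rc) (r, c)).1.get? k
        = (r.get? k).or (pvVals D k).head?)
  ∧ (D.foldl (fun rc d => d.items.foldl group_parameters_bstep rc) (r, c)).1.keys
        = PySem.Set.update r.keys (D.flatMap PySem.Dict.keys)
  ∧ ∀ k, (k ∈ (D.foldl (fun rc d => d.items.foldl group_parameters_bstep rc) (r, c)).2 ↔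
      k ∈ c ∨ pvConfl (r.get? k) (pvVals D k)) := by
  induction D generalizing r c with
  | nil =>
    refine ⟨fun k => ?_, ?_, fun k => ?_⟩
    · simp [pvVals]
    · simp [PySem.Set.update]
    · simp [pvVals, pvConfl]
  | cons d D ih =>
    have hd : d.keys.Nodup := hD d (by simp)
    have hD' : ∀ d' ∈ D, d'.keys.Nodup := fun d' h => hD d' (by simp [h])
    simp only [List.foldl_cons, List.flatMap_cons]
    obtain ⟨pa, pb, pc⟩ := bstep_dict d hd r c
    set mid := d.items.foldl group_parameters_bstep (r, c) with hmid
    obtain ⟨iha, ihb, ihc⟩ := ih hD' mid.1 mid.2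
    refine ⟨fun k => ?_, ?_, fun k => ?_⟩
    · rw [show (List.foldl (fun rc d => List.foldl group_parameters_bstep rc d.items) mid D) =
          (List.foldl (fun rc d => List.foldl group_parameters_bstep rc d.items) (mid.1, mid.2) D) by rfl] at *
      rw [iha k, pa k, pvVals_cons]
      cases h : d.get? k <;> cases h2 : r.get? k <;> simp [h, h2]
    · rw [show (List.foldl (fun rc d => List.foldl group_parameters_bstep rc d.items) mid D) =
          (List.foldl (fun rc d => List.foldl group_parameters_bstep rc d.items) (mid.1, mid.2) D) by rfl] at *
      rw [ihb, pb, PySem.Set.update_append]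
    · rw [show (List.foldl (fun rc d => List.foldl group_parameters_bstep rc d.items) mid D) =
          (List.foldl (fun rc d => List.foldl group_parameters_bstep rc d.items) (mid.1, mid.2) D) by rfl] at *
      rw [ihc k, pvVals_cons]
      rw [pa k]
      rw [pc k]
      cases h : d.get? k <;> cases h2 : r.get? k <;>
        simp [h, h2, pvConfl] <;> tauto

theorem akeys_eq (D : List (PySem.Dict String String)) (s : PySem.Set String) :
    D.foldl (fun s params => PySem.Set.union s params.keys) s
      = PySem.Set.update s (D.flatMap PySem.Dict.keys) := by
  induction D generalizing s with
  | nil => simp [PySem.Set.update]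
  | cons d D ih =>
    simp only [List.foldl_cons, List.flatMap_cons, PySem.Set.update_append]
    rw [ih]
    rfl

theorem pvVals_nil_iff (D : List (PySem.Dict String String)) (k : String) :
    pvVals D k = [] ↔ ∀ d ∈ D, d.get? k = none := by
  simp [pvVals, List.filterMap_eq_nil_iff]

theorem mem_flatMap_keys_iff (D : List (PySem.Dict String String)) (k : String) :
    k ∈ D.flatMap PySem.Dict.keys ↔ pvVals D k ≠ [] := by
  rw [List.mem_flatMap, Ne, pvVals_nil_iff]
  push_neg
  constructor
  · rintro ⟨d, hd, hk⟩
    refine ⟨d, hd, ?_⟩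
    rw [Ne, PySem.Dict.get?_eq_none_iff_not_mem_keys]
    simpa using hk
  · rintro ⟨d, hd, hk⟩
    refine ⟨d, hd, ?_⟩
    rw [Ne, PySem.Dict.get?_eq_none_iff_not_mem_keys] at hk
    simpa using hk

theorem set_len_one_iff (v : String) (l : List String) :
    (PySem.Set.ofList (v :: l)).length = 1 ↔ ¬ pvConfl (some v) l := by
  rw [show pvConfl (some v) l ↔ ∃ u ∈ l, u ≠ v by
    induction l with
    | nil => simp [pvConfl]
    | cons u l ih =>
      simp only [pvConfl, ih, List.mem_cons]
      constructor
      · rintro (h | ⟨u', hu', hne⟩)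
        · exact ⟨u, Or.inl rfl, h⟩
        · exact ⟨u', Or.inr hu', hne⟩
      · rintro ⟨u', (rfl | hu'), hne⟩
        · exact Or.inl hne
        · exact Or.inr ⟨u', hu', hne⟩]
  rw [PySem.Set.ofList_cons]
  simp only [List.length_cons]
  constructor
  · intro h
    have h0 : (PySem.Set.ofList l).discard v = [] := List.length_eq_zero_iff.mp (by omega)
    rintro ⟨u, hu, hne⟩
    have hmem : u ∈ (PySem.Set.ofList l).discard v := by
      rw [PySem.Set.mem_discard]
      exact ⟨(PySem.Set.mem_ofList _ _).mpr hu, hne⟩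
    simp [h0] at hmem
  · intro h
    have h0 : (PySem.Set.ofList l).discard v = [] := by
      rw [List.eq_nil_iff_forall_not_mem]
      intro u hu
      rw [PySem.Set.mem_discard] at hu
      exact h ⟨u, (PySem.Set.mem_ofList _ _).mp hu.1, hu.2⟩
    simp [h0]

theorem pair_fold (L : List String) (P : String → Prop) [DecidablePred P] (R : String → Bool)
    (f g : String → String) (hPR : ∀ k ∈ L, (P k ↔ R k = false)) (hfg : ∀ k ∈ L, f k = g k)
    (a : PySem.Dict String String) (b : PySem.Dict String Bool) :
    L.foldl (fun cv k => if P k then (cv.1.insert k (f k), cv.2) else (cv.1, cv.2.insert k true)) (a, b)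
    = (L.foldl (fun d kv => if R kv then d else d.insert kv (g kv)) a,
       L.foldl (fun d kv => if R kv then d.insert kv true else d) b) := by
  induction L generalizing a b with
  | nil => rfl
  | cons x L ih =>
    simp only [List.foldl_cons]
    have hx := hPR x (by simp)
    have hfx := hfg x (by simp)
    by_cases hP : P x
    · have hR := hx.mp hP
      rw [if_pos hP, hfx, hR]
      simp only [Bool.false_eq_true, if_false]
      exact ih (fun k hk => hPR k (by simp [hk])) (fun k hk => hfg k (by simp [hk])) _ _
    · have hR : R x = true := by
        cases h : R x
        · exact absurd (hx.mpr h) hP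
        · rfl
      rw [if_neg hP, if_pos hR, if_pos hR]
      exact ih (fun k hk => hPR k (by simp [hk])) (fun k hk => hfg k (by simp [hk])) _ _

theorem extract_parameters_nodup (s : String) : (extract_parameters s).keys.Nodup := by
  unfold extract_parameters
  generalize ((PySem.Str.split? s "_").getD []) = l
  have gen : ∀ (l : List String) (d : PySem.Dict String String), d.keys.Nodup →
      (l.foldl (fun params param =>
        match (PySem.Str.split? param "=").getD [] with
        | [key, value] => params.insert key value
        | _ => params) d).keys.Nodup := by
    intro l
    induction l with
    | nil => intro d hd; simpa using hd
    | cons p l ih =>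
      intro d hd
      simp only [List.foldl_cons]
      apply ih
      rcases h : (PySem.Str.split? p "=").getD [] with _ | ⟨k, _ | ⟨v, rest⟩⟩
      · simpa using hd
      · simpa using hd
      · cases rest with
        | nil => simpa using PySem.Dict.nodup_keys_insert _ _ _ hd
        | cons a b => simpa using hd
  exact gen l PySem.Dict.empty (by simpa using PySem.Dict.nodup_keys_empty)

theorem main_equal (configs : List String) :
    group_parameters configs = group_parameters_alt configs := by
  unfold group_parameters group_parameters_alt
  simp only []
  set D := configs.map extract_parameters with hDdefX
  have hD : ∀ d ∈ D, d.keys.Nodup := by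
    intro d hd
    rw [hDdefX, List.mem_map] at hd
    obtain ⟨s, _, rfl⟩ := hd
    exact extract_parameters_nodup s
  -- B's pass, rewritten as a fold over D
  have hBfold : configs.foldl
      (fun rc config => (extract_parameters config).items.foldl group_parameters_bstep rc)
      (PySem.Dict.empty, PySem.Set.empty)
    = D.foldl (fun rc d => d.items.foldl group_parameters_bstep rc)
      (PySem.Dict.empty, PySem.Set.empty) := by
    rw [hDdefX, List.foldl_map]
  rw [hBfold]
  set rc := D.foldl (fun rc d => d.items.foldl group_parameters_bstep rc)
      (PySem.Dict.empty, PySem.Set.empty) with hrc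
  obtain ⟨hget, hkeys, hconf⟩ := bfold_spec D hD PySem.Dict.empty PySem.Set.empty
  rw [← hrc] at hget hkeys hconf
  set K : PySem.Set String := PySem.Set.ofList (D.flatMap PySem.Dict.keys) with hK
  have hkeysK : rc.1.keys = K := by
    rw [hkeys]
    rfl
  have hKnodup : K.Nodup := PySem.Set.nodup_ofList _
  have hgetK : ∀ k, rc.1.get? k = (pvVals D k).head? := by
    intro k
    rw [hget k, PySem.Dict.get?_empty, Option.none_or]
  have hconfK : ∀ k, (k ∈ rc.2 ↔ pvConfl none (pvVals D k)) := by
    intro k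
    rw [hconf k, PySem.Dict.get?_empty]
    simp [PySem.Set.empty]
  -- A's all_keys is K
  have hak : D.foldl (fun s params => PySem.Set.union s params.keys) PySem.Set.empty = K := by
    rw [akeys_eq]
    rfl
  rw [hak]
  -- B's rep items are K with the recorded first values
  have hitems : rc.1.items = K.map (fun k => (k, rc.1.getD k "")) := by
    rw [← hkeysK]
    exact PySem.Dict.items_eq_map_keys rc.1 (hkeysK ▸ hKnodup) ""
  -- match A's per-key fold with B's two comprehensions
  have hPR : ∀ k ∈ K, (((PySem.Set.ofList (pvVals D k)).length = 1) ↔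
      PySem.Set.contains rc.2 k = false) := by
    intro k hk
    have hkne : pvVals D k ≠ [] := by
      rw [← mem_flatMap_keys_iff D k]
      rw [hK] at hk
      exact (PySem.Set.mem_ofList _ _).mp hk
    obtain ⟨v, l, hvl⟩ : ∃ v l, pvVals D k = v :: l := by
      cases h : pvVals D k with
      | nil => exact absurd h hkne
      | cons v l => exact ⟨v, l, rfl⟩
    rw [hvl, set_len_one_iff]
    have : PySem.Set.contains rc.2 k = false ↔ ¬ k ∈ rc.2 := by
      rw [← PySem.Set.contains_iff]
      simp
    rw [this, hconfK k, hvl]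
    rfl
  have hfg : ∀ k ∈ K, (pvVals D k).headD "" = rc.1.getD k "" := by
    intro k _
    rw [PySem.Dict.getD_eq_get?_getD, hgetK k]
    cases h : pvVals D k <;> simp [h]
  have hpair := pair_fold K (fun k => (PySem.Set.ofList (pvVals D k)).length = 1)
    (fun k => PySem.Set.contains rc.2 k)
    (fun k => (pvVals D k).headD "") (fun k => rc.1.getD k "")
    hPR hfg PySem.Dict.empty PySem.Dict.empty
  have hA : K.foldl (group_parameters_akey D) (PySem.Dict.empty, PySem.Dict.empty)
      = K.foldl (fun cv k => if (PySem.Set.ofList (pvVals D k)).length = 1 then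
          (cv.1.insert k ((pvVals D k).headD ""), cv.2) else (cv.1, cv.2.insert k true))
        (PySem.Dict.empty, PySem.Dict.empty) := rfl
  have hcommon : rc.1.items.foldl
      (fun d kv => if PySem.Set.contains rc.2 kv.1 then d else d.insert kv.1 kv.2)
      PySem.Dict.empty
    = K.foldl (fun d k => if PySem.Set.contains rc.2 k then d else d.insert k (rc.1.getD k ""))
      PySem.Dict.empty := by
    rw [hitems, List.foldl_map]
  have hvarying : rc.1.keys.foldl
      (fun d k => if PySem.Set.contains rc.2 k then d.insert k true else d)
      PySem.Dict.empty
    = K.foldl (fun d k => if PySem.Set.contains rc.2 k then d.insert k true else d)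
      PySem.Dict.empty := by rw [hkeysK]
  rw [hA, hcommon, hvarying, hpair]

-- ===== VERDICT (by name: the statement is the Claim_ definition above) =====
theorem group_parameters_spec : Claim_equal_group_parameters := by
  intro configs _ _
  unfold Spec_group_parameters
  exact main_equal configs
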